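-- pv_equiv track=rewrite | github.com/pypi-data/pypi-mirror-18 | packages/RSA_Tools/RSA_Tools-1.0.2.tar.gz/RSA_Tools-1.0.2/RSA_Tools/William_p.py | William_alg
-- ===== SOURCE A (Python) =====
-- def William_alg(L,n,N):
--     d = L[:]
--     if(n==1):
--         return L
--     else:
--         for i in range(1,n):
--             d = [(d[0]*L[0]+21*d[1]*L[1])%N,(d[0]*L[1]+d[1]*L[0])%N]
--     return d
-- ===== SOURCE B (Python) =====
-- def William_alg(L, n, N):
--     if n <= 1:
--         return L[:]
--     a, b = L[0] % N, L[1] % N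
--     x, y = 1 % N, 0
--     m = n
--     while m:
--         if m & 1:
--             x, y = (x * a + 21 * y * b) % N, (x * b + y * a) % N
--         a, b = (a * a + 21 * b * b) % N, (2 * a * b) % N
--         m >>= 1
--     return [x, y]
-- ===== Notes on version B (the rewrite author's own statement) =====
-- stated objective: faster
-- what changed: Replaces A's n-1 sequential ring multiplications with binary exponentiation (square-and-multiply) of the element L[0]+L[1]*sqrt(21) modulo N.
import Mathlib
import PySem

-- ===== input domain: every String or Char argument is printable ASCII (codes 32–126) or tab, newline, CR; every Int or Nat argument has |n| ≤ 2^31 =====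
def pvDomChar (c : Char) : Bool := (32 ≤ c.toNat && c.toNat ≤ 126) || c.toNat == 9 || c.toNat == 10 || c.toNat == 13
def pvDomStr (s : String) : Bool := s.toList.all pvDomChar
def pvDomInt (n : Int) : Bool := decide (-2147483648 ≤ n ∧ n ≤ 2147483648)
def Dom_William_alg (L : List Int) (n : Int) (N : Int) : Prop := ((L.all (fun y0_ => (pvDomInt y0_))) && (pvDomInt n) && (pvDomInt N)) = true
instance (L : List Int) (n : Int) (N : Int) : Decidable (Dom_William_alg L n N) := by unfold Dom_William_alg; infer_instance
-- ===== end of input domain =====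

-- B replaces A's n-1 sequential ring multiplications in Z[sqrt 21] mod N by binary
-- exponentiation (square-and-multiply), an asymptotically faster (O(log n)) algorithm.


-- ===== PORT A =====
-- one iteration of A's for-loop body: d = [(d[0]*L[0]+21*d[1]*L[1])%N, (d[0]*L[1]+d[1]*L[0])%N]
def stepA (L : List Int) (N : Int) (d : List Int) : List Int :=
  [PySem.Int.mod (((PySem.List.pyGet? d 0).getD 0) * ((PySem.List.pyGet? L 0).getD 0)
      + 21 * ((PySem.List.pyGet? d 1).getD 0) * ((PySem.List.pyGet? L 1).getD 0)) N,
   PySem.Int.mod (((PySem.List.pyGet? d 0).getD 0) * ((PySem.List.pyGet? L 1).getD 0)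
      + ((PySem.List.pyGet? d 1).getD 0) * ((PySem.List.pyGet? L 0).getD 0)) N]

def William_alg (L : List Int) (n : Int) (N : Int) : List Int :=
  let d := L          -- d = L[:]
  if n = 1 then L
  else (PySem.List.pyRange 1 n 1).foldl (fun d _ => stepA L N d) d

-- ===== PORT B =====
-- B's while-loop: square-and-multiply with accumulator (x, y) and base (a, b), exponent m
def bexpLoop (N a b x y : Int) : Nat → Int × Int
  | 0 => (x, y)
  | m + 1 =>
      let x' := if (m + 1) % 2 = 1 then PySem.Int.mod (x * a + 21 * y * b) N else x
      let y' := if (m + 1) % 2 = 1 then PySem.Int.mod (x * b + y * a) N else y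
      bexpLoop N (PySem.Int.mod (a * a + 21 * b * b) N) (PySem.Int.mod (2 * a * b) N)
        x' y' ((m + 1) / 2)
  decreasing_by omega

def William_alg_alt (L : List Int) (n : Int) (N : Int) : List Int :=
  if n ≤ 1 then L
  else
    [(bexpLoop N (PySem.Int.mod ((PySem.List.pyGet? L 0).getD 0) N)
        (PySem.Int.mod ((PySem.List.pyGet? L 1).getD 0) N) (PySem.Int.mod 1 N) 0 n.toNat).1,
     (bexpLoop N (PySem.Int.mod ((PySem.List.pyGet? L 0).getD 0) N)
        (PySem.Int.mod ((PySem.List.pyGet? L 1).getD 0) N) (PySem.Int.mod 1 N) 0 n.toNat).2]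

-- ===== PRECONDITION & SPEC =====
-- Pre_ excludes only the inputs on which A raises: for n ≥ 2 A indexes L[0], L[1]
-- (IndexError if len(L) < 2) and reduces % N (ZeroDivisionError if N = 0).
def Pre_William_alg (L : List Int) (n : Int) (N : Int) : Prop :=
  2 ≤ n → (2 ≤ L.length ∧ N ≠ 0)
instance (L : List Int) (n : Int) (N : Int) : Decidable (Pre_William_alg L n N) := by
  unfold Pre_William_alg; infer_instance

def pvWitness_William_alg : List Int × Int × Int := ([2, 3], 5, 7)

def Spec_William_alg (L : List Int) (n : Int) (N : Int) (out : List Int) : Prop := out = William_alg_alt L n N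
instance (L : List Int) (n : Int) (N : Int) (out : List Int) : Decidable (Spec_William_alg L n N out) := by unfold Spec_William_alg; infer_instance

-- ===== CLAIM (what is proved, stated in full; the proofs are below) =====
def Claim_equal_William_alg : Prop := ∀ (L : List Int) (n : Int) (N : Int), Dom_William_alg L n N → Pre_William_alg L n N → Spec_William_alg L n N (William_alg L n N)

-- ===== LEMMAS AND PROOFS =====

-- exact multiplication in Z[sqrt 21], components as pairs
def pwMul (p q : Int × Int) : Int × Int :=
  (p.1 * q.1 + 21 * p.2 * q.2, p.1 * q.2 + p.2 * q.1)

-- exact k-th power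
def pw (p : Int × Int) : Nat → Int × Int
  | 0 => (1, 0)
  | k + 1 => pwMul p (pw p k)

theorem pwMul_comm (p q : Int × Int) : pwMul p q = pwMul q p := by
  simp only [pwMul, Prod.mk.injEq]; constructor <;> ring

theorem pwMul_assoc (p q r : Int × Int) : pwMul (pwMul p q) r = pwMul p (pwMul q r) := by
  simp only [pwMul, Prod.mk.injEq]; constructor <;> ring

theorem pwMul_one_left (p : Int × Int) : pwMul (1, 0) p = p := by
  obtain ⟨p1, p2⟩ := p; simp only [pwMul, Prod.mk.injEq]; constructor <;> ring

theorem pw_one (p : Int × Int) : pw p 1 = p := by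
  obtain ⟨p1, p2⟩ := p; simp only [pw, pwMul, Prod.mk.injEq]; constructor <;> ring

theorem pw_succ (p : Int × Int) (k : Nat) : pw p (k + 1) = pwMul p (pw p k) := rfl

theorem pw_sq (p : Int × Int) (k : Nat) : pw (pwMul p p) k = pw p (2 * k) := by
  induction k with
  | zero => rfl
  | succ k ih =>
      have h2 : 2 * (k + 1) = (2 * k + 1) + 1 := by ring
      rw [pw_succ, ih, h2, pw_succ, pw_succ, ← pwMul_assoc]

theorem mod_modEq (x N : Int) : Int.ModEq N (PySem.Int.mod x N) x := by
  have h := PySem.Int.floordiv_mul_add_mod x N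
  have : N ∣ x - PySem.Int.mod x N := ⟨PySem.Int.floordiv x N, by linarith [mul_comm (PySem.Int.floordiv x N) N]⟩
  exact (Int.modEq_iff_dvd.mpr this)

theorem mod_congr {N : Int} (hN : N ≠ 0) {x y : Int} (h : Int.ModEq N x y) :
    PySem.Int.mod x N = PySem.Int.mod y N := by
  rcases lt_or_gt_of_ne hN with hneg | hpos
  · have hx := PySem.Int.mod_neg_bounds x hneg
    have hy := PySem.Int.mod_neg_bounds y hneg
    have hc : Int.ModEq N (PySem.Int.mod x N) (PySem.Int.mod y N) :=
      ((mod_modEq x N).trans h).trans (mod_modEq y N).symm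
    have hdvd : N ∣ (PySem.Int.mod y N - PySem.Int.mod x N) := Int.modEq_iff_dvd.mp hc
    have hdvd' : (-N) ∣ (PySem.Int.mod y N - PySem.Int.mod x N) := (neg_dvd).mpr hdvd
    have habs : |PySem.Int.mod y N - PySem.Int.mod x N| < -N := by
      rw [abs_lt]; omega
    have := Int.eq_zero_of_abs_lt_dvd hdvd' habs
    omega
  · rw [PySem.Int.mod_eq_emod_of_pos hpos, PySem.Int.mod_eq_emod_of_pos hpos]
    exact h

-- A's loop (which ignores the loop index) is an iteration of stepA
theorem foldl_const_iterate {α β : Type} (f : α → α) (l : List β) (d : α) :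
    l.foldl (fun d _ => f d) d = f^[l.length] d := by
  induction l generalizing d with
  | nil => rfl
  | cons hd tl ih => simp [List.foldl, ih, Function.iterate_succ_apply]

theorem length_pyRange_one (a b : Int) : (PySem.List.pyRange a b 1).length = (b - a).toNat := by
  by_cases h : a < b
  · simp only [PySem.List.pyRange]
    norm_num [h]
  · simp only [PySem.List.pyRange]
    norm_num [h]
    omega

-- stepA on a two-element list, in terms of the first two entries of L
theorem stepA_pair (L : List Int) (N u v : Int) :
    stepA L N [u, v] =
      [PySem.Int.mod (u * ((PySem.List.pyGet? L 0).getD 0)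
          + 21 * v * ((PySem.List.pyGet? L 1).getD 0)) N,
       PySem.Int.mod (u * ((PySem.List.pyGet? L 1).getD 0)
          + v * ((PySem.List.pyGet? L 0).getD 0)) N] := by
  simp [stepA, PySem.List.pyGet?, PySem.List.pyIdx?]

-- invariant of A's loop: after k ≥ 1 iterations d holds pw (p,q) (k+1) reduced mod N
theorem iterate_stepA (L : List Int) (N : Int) (hN : N ≠ 0) (k : Nat) (hk : 1 ≤ k) :
    (stepA L N)^[k] L =
      [PySem.Int.mod (pw ((PySem.List.pyGet? L 0).getD 0, (PySem.List.pyGet? L 1).getD 0) (k + 1)).1 N,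
       PySem.Int.mod (pw ((PySem.List.pyGet? L 0).getD 0, (PySem.List.pyGet? L 1).getD 0) (k + 1)).2 N] := by
  set p := (PySem.List.pyGet? L 0).getD 0 with hp
  set q := (PySem.List.pyGet? L 1).getD 0 with hq
  induction k with
  | zero => omega
  | succ k ih =>
      rcases Nat.eq_or_lt_of_le hk with h1 | h1
      · -- k + 1 = 1: one application of stepA to L itself
        have : k = 0 := by omega
        subst this
        show stepA L N L = _
        simp only [stepA, pw, pwMul, ← hp, ← hq]
        have e1 : p * p + 21 * q * q = p * (p * 1 + 21 * q * 0) + 21 * q * (p * 0 + q * 1) := by ring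
        have e2 : p * q + q * p = p * (p * 0 + q * 1) + q * (p * 1 + 21 * q * 0) := by ring
        rw [e1, e2]
      · have hk1 : 1 ≤ k := by omega
        rw [Function.iterate_succ_apply', ih hk1, stepA_pair, ← hp, ← hq]
        have e1 : Int.ModEq N
            (PySem.Int.mod (pw (p, q) (k + 1)).1 N * p + 21 * PySem.Int.mod (pw (p, q) (k + 1)).2 N * q)
            ((pw (p, q) (k + 1 + 1)).1) := by
          have h1 := mod_modEq (pw (p, q) (k + 1)).1 N
          have h2 := mod_modEq (pw (p, q) (k + 1)).2 N
          have : (pw (p, q) (k + 1 + 1)).1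
              = (pw (p, q) (k + 1)).1 * p + 21 * (pw (p, q) (k + 1)).2 * q := by
            simp only [pw_succ, pwMul]; ring
          rw [this]
          exact ((h1.mul_right p).add (((h2.mul_left 21).mul_right q)))
        have e2 : Int.ModEq N
            (PySem.Int.mod (pw (p, q) (k + 1)).1 N * q + PySem.Int.mod (pw (p, q) (k + 1)).2 N * p)
            ((pw (p, q) (k + 1 + 1)).2) := by
          have h1 := mod_modEq (pw (p, q) (k + 1)).1 N
          have h2 := mod_modEq (pw (p, q) (k + 1)).2 N
          have : (pw (p, q) (k + 1 + 1)).2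
              = (pw (p, q) (k + 1)).1 * q + (pw (p, q) (k + 1)).2 * p := by
            simp only [pw_succ, pwMul]; ring
          rw [this]
          exact ((h1.mul_right q).add (h2.mul_right p))
        rw [mod_congr hN e1, mod_congr hN e2]

-- invariant of B's loop: congruent inputs, exponent ≥ 1 ⇒ reduced exact result
theorem bexpLoop_eq (N : Int) (hN : N ≠ 0) :
    ∀ (m : Nat), 1 ≤ m → ∀ (a b x y : Int) (P Z : Int × Int),
      Int.ModEq N a P.1 → Int.ModEq N b P.2 → Int.ModEq N x Z.1 → Int.ModEq N y Z.2 →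
      bexpLoop N a b x y m =
        (PySem.Int.mod (pwMul Z (pw P m)).1 N, PySem.Int.mod (pwMul Z (pw P m)).2 N) := by
  intro m
  induction m using Nat.strong_induction_on with
  | _ m ih =>
    intro hm a b x y P Z ha hb hx hy
    match m, hm with
    | Nat.succ m, _ =>
      show bexpLoop N a b x y (m + 1) = _
      rw [bexpLoop]
      by_cases hz : (m + 1) / 2 = 0
      · -- m + 1 = 1 : last multiply, then exponent 0
        have hm0 : m = 0 := by omega
        subst hm0
        simp only [hz, bexpLoop]
        have e1 : Int.ModEq N (x * a + 21 * y * b) ((pwMul Z (pw P 1)).1) := by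
          rw [pw_one]
          have : (pwMul Z P).1 = Z.1 * P.1 + 21 * Z.2 * P.2 := rfl
          rw [this]
          exact (hx.mul ha).add ((hy.mul_left 21).mul hb)
        have e2 : Int.ModEq N (x * b + y * a) ((pwMul Z (pw P 1)).2) := by
          rw [pw_one]
          have : (pwMul Z P).2 = Z.1 * P.2 + Z.2 * P.1 := rfl
          rw [this]
          exact (hx.mul hb).add (hy.mul ha)
        rw [mod_congr hN e1, mod_congr hN e2]
        simp
      · -- (m+1)/2 ≥ 1 : recurse with squared base
        have hlt : (m + 1) / 2 < m + 1 := by omega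
        have hge : 1 ≤ (m + 1) / 2 := by omega
        have hA' : Int.ModEq N (PySem.Int.mod (a * a + 21 * b * b) N) ((pwMul P P).1) := by
          refine (mod_modEq _ N).trans ?_
          have : (pwMul P P).1 = P.1 * P.1 + 21 * P.2 * P.2 := rfl
          rw [this]
          exact (ha.mul ha).add ((hb.mul_left 21).mul hb)
        have hB' : Int.ModEq N (PySem.Int.mod (2 * a * b) N) ((pwMul P P).2) := by
          refine (mod_modEq _ N).trans ?_
          have : (pwMul P P).2 = P.1 * P.2 + P.2 * P.1 := rfl
          rw [this]
          have := (ha.mul hb)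
          calc 2 * a * b = a * b + a * b := by ring
            _ ≡ P.1 * P.2 + P.2 * P.1 [ZMOD N] := by
                  exact this.add (this.trans (by rw [mul_comm]))
        by_cases hodd : (m + 1) % 2 = 1
        · -- odd: accumulator multiplied by base, m + 1 = 2 * ((m+1)/2) + 1
          simp only [hodd, if_true]
          have hx' : Int.ModEq N (PySem.Int.mod (x * a + 21 * y * b) N) ((pwMul Z P).1) := by
            refine (mod_modEq _ N).trans ?_
            have : (pwMul Z P).1 = Z.1 * P.1 + 21 * Z.2 * P.2 := rfl
            rw [this]
            exact (hx.mul ha).add ((hy.mul_left 21).mul hb)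
          have hy' : Int.ModEq N (PySem.Int.mod (x * b + y * a) N) ((pwMul Z P).2) := by
            refine (mod_modEq _ N).trans ?_
            have : (pwMul Z P).2 = Z.1 * P.2 + Z.2 * P.1 := rfl
            rw [this]
            exact (hx.mul hb).add (hy.mul ha)
          rw [ih _ hlt hge _ _ _ _ (pwMul P P) (pwMul Z P) hA' hB' hx' hy']
          have halg : pwMul (pwMul Z P) (pw (pwMul P P) ((m + 1) / 2)) = pwMul Z (pw P (m + 1)) := by
            rw [pw_sq]
            have hsum : m + 1 = 2 * ((m + 1) / 2) + 1 := by omega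
            conv_rhs => rw [hsum]
            rw [pw_succ, pwMul_assoc, pwMul_comm P (pw P (2 * ((m + 1) / 2)))]
          rw [halg]
        · -- even: accumulator unchanged, m + 1 = 2 * ((m+1)/2)
          simp only [hodd, if_false]
          rw [ih _ hlt hge _ _ _ _ (pwMul P P) Z hA' hB' hx hy]
          have halg : pwMul Z (pw (pwMul P P) ((m + 1) / 2)) = pwMul Z (pw P (m + 1)) := by
            rw [pw_sq]
            have hsum : m + 1 = 2 * ((m + 1) / 2) := by omega
            rw [← hsum]
          rw [halg]

-- ===== VERDICT (by name: the statement is the Claim_ definition above) =====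
theorem William_alg_spec : Claim_equal_William_alg := by
  intro L n N _ hpre
  unfold Spec_William_alg William_alg William_alg_alt
  by_cases hle : n ≤ 1
  · -- A: n = 1 branch returns L; otherwise the range is empty and the fold returns L
    rw [if_pos hle]
    by_cases h1 : n = 1
    · rw [if_pos h1]
    · rw [if_neg h1]
      have hnil : PySem.List.pyRange 1 n 1 = [] := by
        have := length_pyRange_one 1 n
        have hlen : (PySem.List.pyRange 1 n 1).length = 0 := by omega
        exact List.eq_nil_of_length_eq_zero hlen
      rw [hnil]
      rfl
  · -- 2 ≤ n : both compute pw (L0, L1) n mod N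
    have h2 : 2 ≤ n := by omega
    obtain ⟨hlen, hN⟩ := hpre h2
    rw [if_neg hle, if_neg (by omega : ¬ n = 1)]
    have hfold : (PySem.List.pyRange 1 n 1).foldl (fun d _ => stepA L N d) L
        = (stepA L N)^[(n - 1).toNat] L := by
      rw [foldl_const_iterate, length_pyRange_one]
    have hk1 : 1 ≤ (n - 1).toNat := by omega
    have hm1 : 1 ≤ n.toNat := by omega
    have hxm : Int.ModEq N (PySem.Int.mod 1 N) (((1 : Int), (0 : Int)) : Int × Int).1 := mod_modEq 1 N
    have hym : Int.ModEq N (0 : Int) (((1 : Int), (0 : Int)) : Int × Int).2 := Int.ModEq.refl 0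
    have ham : Int.ModEq N (PySem.Int.mod ((PySem.List.pyGet? L 0).getD 0) N)
        (((PySem.List.pyGet? L 0).getD 0, (PySem.List.pyGet? L 1).getD 0) : Int × Int).1 :=
      mod_modEq _ N
    have hbm : Int.ModEq N (PySem.Int.mod ((PySem.List.pyGet? L 1).getD 0) N)
        (((PySem.List.pyGet? L 0).getD 0, (PySem.List.pyGet? L 1).getD 0) : Int × Int).2 :=
      mod_modEq _ N
    rw [hfold, iterate_stepA L N hN _ hk1,
        bexpLoop_eq N hN n.toNat hm1 _ _ _ _ _ _ ham hbm hxm hym, pwMul_one_left]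
    have hexp : (n - 1).toNat + 1 = n.toNat := by omega
    rw [hexp]
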